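-- pv_equiv track=rewrite | github.com/sanjanadg/danp_llm_conciseness | danp_llm_conciseness.py | _synthetic_conciseness_data
-- ===== SOURCE A (Python) =====
-- def _synthetic_conciseness_data(n_train, n_eval):
--     """Fallback synthetic conciseness examples when dataset download fails."""
--     examples = [
--         ("The quick brown fox jumps over the lazy dog repeatedly and then does it again.",
--          "A fox jumps over a dog."),
--         ("In the year 2024, many people have been working from home for several years now.",
--          "People work from home."),
--         ("The university was founded in the year 1850 and has since grown to become one of the largest.",
--          "The university was founded in 1850."),
--         ("She went to the store to buy some groceries and then she came back home.",
--          "She bought groceries."),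
--         ("The meeting was scheduled for 3pm but it got delayed until 4pm.",
--          "The meeting was delayed to 4pm."),
--     ]
--     n_total = n_train + n_eval
--     expanded = (examples * ((n_total // len(examples)) + 1))[:n_total]
--     train_data = [(f"Make the following text more concise:\n\n{e[0]}\n\nConcise version:",
--                    f" {e[1]}") for e in expanded[:n_train]]
--     eval_data = [(f"Make the following text more concise:\n\n{e[0]}\n\nConcise version:",
--                   f" {e[1]}") for e in expanded[n_train:n_train + n_eval]]
--     return train_data, eval_data
-- ===== SOURCE B (Python) =====
-- def _synthetic_conciseness_data(n_train, n_eval):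
--     """Fallback synthetic conciseness examples when dataset download fails."""
--     examples = [
--         ("The quick brown fox jumps over the lazy dog repeatedly and then does it again.",
--          "A fox jumps over a dog."),
--         ("In the year 2024, many people have been working from home for several years now.",
--          "People work from home."),
--         ("The university was founded in the year 1850 and has since grown to become one of the largest.",
--          "The university was founded in 1850."),
--         ("She went to the store to buy some groceries and then she came back home.",
--          "She bought groceries."),
--         ("The meeting was scheduled for 3pm but it got delayed until 4pm.",
--          "The meeting was delayed to 4pm."),
--     ]
--     train_data, eval_data = [], []
--     pool = []
--     for _ in range(n_train + n_eval):
--         if not pool: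
--             pool = list(examples)
--         long, short = pool.pop(0)
--         item = (f"Make the following text more concise:\n\n{long}\n\nConcise version:",
--                 f" {short}")
--         if len(train_data) < n_train:
--             train_data.append(item)
--         else:
--             eval_data.append(item)
--     return train_data, eval_data
-- ===== Notes on version B (the rewrite author's own statement) =====
-- stated objective: alternative
-- what changed: B drops A's staged construction (replicate the template list (n_total//5)+1 times, slice to n_total, then slice twice more into train/eval and format each slice) and instead makes one streaming pass: a working pool is refilled from the templates whenever it empties, each popped item is formatted once and routed immediately to train_data while it is shorter than n_train, else to eval_data.
-- intended difference: On n_train < 0 with 2*n_train + n_eval > 0, A's negative slice bounds wrap around and return some trailing pool items as train_data (and drop them from eval_data), while B returns an empty train split and all generated items as eval_data, the intended reading of a non-positive requested train count. — e.g. on _synthetic_conciseness_data(-1, 3): A returns ([("Make the following text more concise:\n\nThe quick brown fox jumps over the lazy dog repeatedly and then does it ag…, B returns ([], [("Make the following text more concise:\n\nThe quick brown fox jumps over the lazy dog repeatedly and then does i…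
import Mathlib
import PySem

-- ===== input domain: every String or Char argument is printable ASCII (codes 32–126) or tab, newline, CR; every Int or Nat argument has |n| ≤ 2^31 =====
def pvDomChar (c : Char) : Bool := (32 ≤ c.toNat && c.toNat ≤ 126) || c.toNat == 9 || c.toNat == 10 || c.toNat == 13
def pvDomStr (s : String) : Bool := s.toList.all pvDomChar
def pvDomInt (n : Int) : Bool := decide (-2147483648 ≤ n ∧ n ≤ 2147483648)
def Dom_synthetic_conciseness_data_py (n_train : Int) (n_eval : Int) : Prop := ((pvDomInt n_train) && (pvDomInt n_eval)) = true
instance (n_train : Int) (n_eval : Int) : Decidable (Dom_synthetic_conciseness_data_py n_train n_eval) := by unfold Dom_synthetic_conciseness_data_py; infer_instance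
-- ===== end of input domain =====

-- B replaces A's replicate-then-slice-twice construction by a single streaming pass that refills a working pool from the templates and routes each formatted item to train or eval on the fly (alternative decomposition); on n_train < 0 with 2*n_train + n_eval > 0, A's negative-slice wraparound puts trailing items into train while B returns an empty train split, the intended reading of a non-positive train count.


-- ===== PORT A =====
-- the literal `examples` table both Pythons contain verbatim
def pvExamples : List (String × String) :=
  [("The quick brown fox jumps over the lazy dog repeatedly and then does it again.",
    "A fox jumps over a dog."),
   ("In the year 2024, many people have been working from home for several years now.",
    "People work from home."),
   ("The university was founded in the year 1850 and has since grown to become one of the largest.",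
    "The university was founded in 1850."),
   ("She went to the store to buy some groceries and then she came back home.",
    "She bought groceries."),
   ("The meeting was scheduled for 3pm but it got delayed until 4pm.",
    "The meeting was delayed to 4pm.")]

-- the f-string pair both Pythons build, verbatim
def pvFmt (e : String × String) : String × String :=
  ("Make the following text more concise:\n\n" ++ e.1 ++ "\n\nConcise version:",
   " " ++ e.2)

-- Python `xs * k`: k concatenated copies, [] for k ≤ 0 (toNat clamps exactly like CPython)
def pvListMul {α : Type} (xs : List α) (k : Int) : List α :=
  (List.replicate k.toNat xs).flatten

def synthetic_conciseness_data_py (n_train : Int) (n_eval : Int) :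
    (List (String × String)) × (List (String × String)) :=
  let examples := pvExamples
  let n_total := n_train + n_eval
  let expanded := PySem.List.slice
      (pvListMul examples (PySem.Int.floordiv n_total (examples.length : Int) + 1))
      none (some n_total)
  let train_data := (PySem.List.slice expanded none (some n_train)).map pvFmt
  let eval_data := (PySem.List.slice expanded (some n_train) (some (n_train + n_eval))).map pvFmt
  (train_data, eval_data)

-- ===== PORT B =====
-- one iteration of Source B's loop body: refill the pool when empty, pop its head,
-- format it, and append to train while it is shorter than n_train, else to eval
def pvAltStep (n_train : Int)
    (st : List (String × String) × List (String × String) × List (String × String)) :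
    List (String × String) × List (String × String) × List (String × String) :=
  let pool := if st.1.isEmpty then pvExamples else st.1
  match pool with
  | [] => st            -- totality guard only: pvExamples is nonempty, so pool never is here
  | e :: rest =>
    let item := pvFmt e
    if (st.2.1.length : Int) < n_train then (rest, st.2.1 ++ [item], st.2.2)
    else (rest, st.2.1, st.2.2 ++ [item])

def synthetic_conciseness_data_py_alt (n_train : Int) (n_eval : Int) :
    (List (String × String)) × (List (String × String)) :=
  let st := (PySem.List.pyRange 0 (n_train + n_eval) 1).foldl
      (fun st _ => pvAltStep n_train st) ([], [], [])
  (st.2.1, st.2.2)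

-- ===== PRECONDITION & SPEC =====
-- On n_train < 0 with 0 < 2*n_train + n_eval, A's negative slice bounds wrap around and put
-- the last items of the pool into train_data; B returns an empty train split there, which is
-- the intended meaning of requesting a non-positive number of training examples.
def D_synthetic_conciseness_data_py (n_train : Int) (n_eval : Int) : Prop :=
  n_train < 0 ∧ 0 < 2 * n_train + n_eval
instance (n_train : Int) (n_eval : Int) : Decidable (D_synthetic_conciseness_data_py n_train n_eval) := by unfold D_synthetic_conciseness_data_py; infer_instance

def Spec_synthetic_conciseness_data_py (n_train : Int) (n_eval : Int) (out : (List (String × String)) × (List (String × String))) : Prop := ¬ D_synthetic_conciseness_data_py n_train n_eval → out = synthetic_conciseness_data_py_alt n_train n_eval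
instance (n_train : Int) (n_eval : Int) (out : (List (String × String)) × (List (String × String))) : Decidable (Spec_synthetic_conciseness_data_py n_train n_eval out) := by unfold Spec_synthetic_conciseness_data_py; infer_instance

def pvDiffWitness_synthetic_conciseness_data_py : Int × Int := (-1, 3)
def pvDiffWitnessOut_synthetic_conciseness_data_py :
    ((List (String × String)) × (List (String × String))) × ((List (String × String)) × (List (String × String))) :=
  (([("Make the following text more concise:\n\nThe quick brown fox jumps over the lazy dog repeatedly and then does it again.\n\nConcise version:",
      " A fox jumps over a dog.")],
    [("Make the following text more concise:\n\nIn the year 2024, many people have been working from home for several years now.\n\nConcise version:",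
      " People work from home.")]),
   ([],
    [("Make the following text more concise:\n\nThe quick brown fox jumps over the lazy dog repeatedly and then does it again.\n\nConcise version:",
      " A fox jumps over a dog."),
     ("Make the following text more concise:\n\nIn the year 2024, many people have been working from home for several years now.\n\nConcise version:",
      " People work from home.")]))

-- ===== CLAIM (what is proved, stated in full; the proofs are below) =====
def Claim_unchanged_synthetic_conciseness_data_py : Prop := ∀ (n_train : Int) (n_eval : Int), Dom_synthetic_conciseness_data_py n_train n_eval → Spec_synthetic_conciseness_data_py n_train n_eval (synthetic_conciseness_data_py n_train n_eval)
def Claim_changed_synthetic_conciseness_data_py : Prop := Dom_synthetic_conciseness_data_py (pvDiffWitness_synthetic_conciseness_data_py.1) (pvDiffWitness_synthetic_conciseness_data_py.2) ∧ D_synthetic_conciseness_data_py (pvDiffWitness_synthetic_conciseness_data_py.1) (pvDiffWitness_synthetic_conciseness_data_py.2) ∧ synthetic_conciseness_data_py (pvDiffWitness_synthetic_conciseness_data_py.1) (pvDiffWitness_synthetic_conciseness_data_py.2) = pvDiffWitnessOut_synthetic_conciseness_data_py.1 ∧ synthetic_conciseness_data_py_alt (pvDiffWitness_synthetic_conciseness_data_py.1)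 (pvDiffWitness_synthetic_conciseness_data_py.2) = pvDiffWitnessOut_synthetic_conciseness_data_py.2 ∧ pvDiffWitnessOut_synthetic_conciseness_data_py.1 ≠ pvDiffWitnessOut_synthetic_conciseness_data_py.2
def Claim_exact_synthetic_conciseness_data_py : Prop := ∀ (n_train : Int) (n_eval : Int), Dom_synthetic_conciseness_data_py n_train n_eval → D_synthetic_conciseness_data_py n_train n_eval → synthetic_conciseness_data_py n_train n_eval ≠ synthetic_conciseness_data_py_alt n_train n_eval

-- ===== LEMMAS AND PROOFS =====

-- the cycled formatted sequence both programs produce (proof vocabulary only)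
def pvSeq (n : Nat) : List (String × String) :=
  (List.range n).map (fun j => pvFmt (pvExamples.getD (j % 5) ("", "")))

-- the working pool after m iterations of B's loop
def pvPoolAt (m : Nat) : List (String × String) :=
  if m % 5 = 0 then [] else pvExamples.drop (m % 5)

lemma pvSeq_succ (m : Nat) :
    pvSeq (m + 1) = pvSeq m ++ [pvFmt (pvExamples.getD (m % 5) ("", ""))] := by
  simp [pvSeq, List.range_succ]

-- Python slicing commutes with mapping (slice bounds only read the length, which map preserves)
lemma slice_map {α β : Type} (f : α → β) (xs : List α) (a? b? : Option Int) :
    PySem.List.slice (xs.map f) a? b? = (PySem.List.slice xs a? b?).map f := by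
  simp [PySem.List.slice, List.map_take, List.map_drop]

-- indexing into k concatenated copies of l is indexing l modulo its length
lemma getD_flatten_replicate {α : Type} (l : List α) (d : α) (k j : Nat)
    (hj : j < k * l.length) :
    ((List.replicate k l).flatten).getD j d = l.getD (j % l.length) d := by
  induction k generalizing j with
  | zero => simp at hj
  | succ k ih =>
    rw [Nat.succ_mul] at hj
    have hl : 0 < l.length := by
      rcases Nat.eq_zero_or_pos l.length with h | h
      · rw [h] at hj; simp at hj
      · exact h
    rw [List.replicate_succ, List.flatten_cons]
    by_cases hjl : j < l.length
    · rw [List.getD_append _ _ _ _ hjl, Nat.mod_eq_of_lt hjl]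
    · rw [Nat.not_lt] at hjl
      rw [List.getD_append_right _ _ _ _ hjl, ih (j - l.length) (by omega),
        Nat.mod_eq_sub_mod hjl]

-- the first s elements of k concatenated copies of l, read off by modular indexing
lemma take_flatten_replicate_eq {α : Type} (l : List α) (d : α) (k s : Nat)
    (hs : s ≤ k * l.length) :
    ((List.replicate k l).flatten).take s
      = (List.range s).map (fun j => l.getD (j % l.length) d) := by
  apply List.ext_getElem
  · simp [List.length_take]
    omega
  · intro j h1 h2
    have hlen : ((List.replicate k l).flatten).length = k * l.length := by
      simp [List.length_flatten]
    have hj : j < s := by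
      simp [List.length_take, hlen] at h1
      omega
    have hl : 0 < l.length := by
      rcases Nat.eq_zero_or_pos l.length with h0 | h0
      · rw [h0] at hs; omega
      · exact h0
    rw [List.getElem_take, List.getElem_map, List.getElem_range]
    rw [← List.getD_eq_getElem _ d (by omega), getD_flatten_replicate l d k j (by omega),
      List.getD_eq_getElem _ d (Nat.mod_lt _ hl)]

-- A's formatted `expanded` list IS the cycled sequence pvSeq
lemma expanded_map_eq (n_total : Int) :
    (PySem.List.slice
        (pvListMul pvExamples (PySem.Int.floordiv n_total (pvExamples.length : Int) + 1))
        none (some n_total)).map pvFmt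
      = pvSeq n_total.toNat := by
  by_cases h : 0 ≤ n_total
  case neg =>
    have hmul : PySem.Int.floordiv n_total (pvExamples.length : Int) + 1 ≤ 0 := by
      rw [show ((pvExamples.length : Nat) : Int) = (5 : Int) from rfl,
        PySem.Int.floordiv_eq_ediv_of_pos (by norm_num)]
      omega
    have h0 : n_total.toNat = 0 := by omega
    simp only [pvListMul, Int.toNat_of_nonpos hmul, h0]
    simp [PySem.List.slice, pvSeq]
  case pos =>
    obtain ⟨m, rfl⟩ : ∃ m : Nat, n_total = (m : Int) := ⟨n_total.toNat, (Int.toNat_of_nonneg h).symm⟩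
    have hlen : pvExamples.length = 5 := rfl
    have hdiv : m ≤ (m / 5 + 1) * 5 := by
      have h5 := Nat.div_add_mod m 5
      have hm5 : m % 5 < 5 := Nat.mod_lt _ (by omega)
      omega
    simp only [pvListMul, hlen]
    rw [PySem.Int.floordiv_natCast,
      show ((((m / 5 : Nat)) : Int) + 1) = (((m / 5 + 1 : Nat)) : Int) by push_cast; ring]
    simp only [Int.toNat_natCast]
    rw [PySem.List.slice_to_natCast,
      take_flatten_replicate_eq pvExamples ("", "") (m / 5 + 1) m (by simp only [hlen]; omega)]
    simp only [pvSeq, List.map_map, hlen]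
    rfl

-- one step of B's loop preserves the invariant
lemma step_inv (t : Int) (m : Nat) :
    pvAltStep t (pvPoolAt m, (pvSeq m).take t.toNat, (pvSeq m).drop t.toNat)
      = (pvPoolAt (m + 1), (pvSeq (m + 1)).take t.toNat, (pvSeq (m + 1)).drop t.toNat) := by
  have hlen : (pvSeq m).length = m := by simp [pvSeq]
  have hcond : (((min t.toNat m : Nat) : Int) < t) ↔ m < t.toNat := by
    omega
  have hpool : (if (pvPoolAt m).isEmpty then pvExamples else pvPoolAt m)
      = pvExamples.drop (m % 5) := by
    have h5 : m % 5 < 5 := Nat.mod_lt _ (by norm_num)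
    unfold pvPoolAt
    interval_cases h : m % 5 <;> simp [pvExamples]
  have hne : pvExamples.drop (m % 5)
      = pvExamples.getD (m % 5) ("", "") :: pvPoolAt (m + 1) := by
    have h5 : m % 5 < 5 := Nat.mod_lt _ (by norm_num)
    have h51 : (m + 1) % 5 = if m % 5 = 4 then 0 else m % 5 + 1 := by split <;> omega
    unfold pvPoolAt
    rw [h51]
    interval_cases h : m % 5 <;> simp [pvExamples]
  rw [pvSeq_succ]
  unfold pvAltStep
  rw [hpool, hne]
  simp only [List.take_append, List.drop_append, hlen, List.length_take]
  by_cases hm : m < t.toNat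
  · rw [if_pos (hcond.mpr hm)]
    have h2 : (pvSeq m).drop t.toNat = [] := List.drop_eq_nil_of_le (by rw [hlen]; omega)
    rw [h2, show t.toNat - m = (t.toNat - m - 1) + 1 from by omega]
    simp
  · rw [if_neg (fun hc => hm (hcond.mp hc))]
    simp [show t.toNat - m = 0 by omega]

-- B's loop ignores the range elements: fold = iterate
lemma foldl_ignore {α β : Type} (g : β → β) (xs : List α) (init : β) :
    xs.foldl (fun st _ => g st) init = g^[xs.length] init := by
  induction xs generalizing init with
  | nil => rfl
  | cons x xs ih => simp [List.foldl_cons, ih, Function.iterate_succ_apply]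

lemma iterate_inv (t : Int) (m : Nat) :
    (pvAltStep t)^[m] ([], [], [])
      = (pvPoolAt m, (pvSeq m).take t.toNat, (pvSeq m).drop t.toNat) := by
  induction m with
  | zero => simp [pvPoolAt, pvSeq]
  | succ m ih => rw [Function.iterate_succ_apply', ih, step_inv]

-- B computes the take/drop split of the cycled sequence
lemma alt_eq (t e : Int) :
    synthetic_conciseness_data_py_alt t e
      = ((pvSeq (t + e).toNat).take t.toNat, (pvSeq (t + e).toNat).drop t.toNat) := by
  unfold synthetic_conciseness_data_py_alt
  rw [foldl_ignore, PySem.List.length_pyRange_one, show t + e - 0 = t + e by ring, iterate_inv]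

-- A computes Python slices of the same cycled sequence
lemma a_eq (t e : Int) :
    synthetic_conciseness_data_py t e
      = (PySem.List.slice (pvSeq (t + e).toNat) none (some t),
         PySem.List.slice (pvSeq (t + e).toNat) (some t) (some (t + e))) := by
  simp only [synthetic_conciseness_data_py]
  rw [Prod.mk.injEq]
  constructor <;> rw [← slice_map, expanded_map_eq]

lemma slice_nil {α : Type} (a? b? : Option Int) :
    PySem.List.slice ([] : List α) a? b? = [] := by
  cases h : PySem.List.slice ([] : List α) a? b? with
  | nil => rfl
  | cons x xs =>
    have hx : x ∈ PySem.List.slice ([] : List α) a? b? := by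
      rw [h]; exact List.mem_cons_self
    exact absurd (PySem.List.mem_of_mem_slice _ _ _ hx) (by simp)

-- ===== VERDICT (by name: the statements are the Claim_ definitions above) =====
theorem synthetic_conciseness_data_py_spec : Claim_unchanged_synthetic_conciseness_data_py := by
  intro t e _ hnd
  show synthetic_conciseness_data_py t e = synthetic_conciseness_data_py_alt t e
  rw [a_eq, alt_eq]
  set k := t + e with hk
  by_cases hkn : k ≤ 0
  · have h0 : k.toNat = 0 := by omega
    rw [h0]
    show (PySem.List.slice (pvSeq 0) none (some t), PySem.List.slice (pvSeq 0) (some t) (some k))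
      = ((pvSeq 0).take t.toNat, (pvSeq 0).drop t.toNat)
    simp [pvSeq, slice_nil]
  · rw [not_le] at hkn
    have hS : (pvSeq k.toNat).length = k.toNat := by simp [pvSeq]
    by_cases ht : 0 ≤ t
    · rw [Prod.mk.injEq]
      refine ⟨PySem.List.slice_to _ ht, ?_⟩
      have h2 := PySem.List.slice_toNat (pvSeq k.toNat) ht (show (0:Int) ≤ k by omega)
      rw [h2]
      exact List.take_of_length_le (by rw [List.length_drop, hS])
    · rw [not_le] at ht
      have hd : 2 * t + e ≤ 0 := by
        unfold D_synthetic_conciseness_data_py at hnd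
        omega
      obtain ⟨c, hcpos, htc⟩ : ∃ c : Nat, 0 < c ∧ t = -((c : Nat) : Int) :=
        ⟨(-t).toNat, by omega, by omega⟩
      have hkc : k.toNat ≤ c := by omega
      rw [Prod.mk.injEq]
      constructor
      · rw [htc, PySem.List.slice_to_neg_natCast _ _ hcpos, hS,
          show k.toNat - c = 0 from by omega, show (-((c : Nat) : Int)).toNat = 0 from by omega]
      · rw [htc, show (-((c : Nat) : Int)).toNat = 0 from by omega, List.drop_zero,
          show (some k) = (some ((k.toNat : Nat) : Int)) from by rw [Int.toNat_of_nonneg (by omega)]]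
        simp only [PySem.List.slice, PySem.List.clampIdx_neg_natCast _ _ hcpos,
          PySem.List.clampIdx_natCast, hS]
        rw [show k.toNat - c = 0 from by omega]
        simp only [List.drop_zero, Nat.sub_zero, min_self]
        exact List.take_of_length_le (by rw [hS])

set_option maxRecDepth 100000 in
theorem synthetic_conciseness_data_py_changed : Claim_changed_synthetic_conciseness_data_py := by
  unfold Claim_changed_synthetic_conciseness_data_py
  refine ⟨by decide, by decide, by decide, by decide, by decide⟩

theorem synthetic_conciseness_data_py_tight : Claim_exact_synthetic_conciseness_data_py := by
  intro t e _ hd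
  rcases hd with ⟨ht, hke⟩
  obtain ⟨c, hcpos, rfl⟩ : ∃ c : Nat, 0 < c ∧ t = -((c : Nat) : Int) :=
    ⟨(-t).toNat, by omega, by omega⟩
  intro heq
  rw [a_eq, alt_eq] at heq
  have h1 := congrArg (fun p => p.1) heq
  simp only at h1
  have hS : (pvSeq (-((c : Nat) : Int) + e).toNat).length = (-((c : Nat) : Int) + e).toNat := by
    simp [pvSeq]
  rw [PySem.List.slice_to_neg_natCast _ _ hcpos, hS] at h1
  have h2 := congrArg List.length h1
  rw [List.length_take, List.length_take, hS] at h2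
  omega
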